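-- pv_equiv track=rewrite | github.com/agenttaffy/AutoCorrect | AutoCorrect.py | looks_like_simple_inflection
-- ===== SOURCE A (Python) =====
-- def looks_like_simple_inflection(original: str, candidate: str) -> bool:
--     if original == candidate:
--         return True
--
--     suffixes = ["s", "es", "ed", "d", "ing", "er", "ers", "est", "ly"]
--     for suf in suffixes:
--         if original.endswith(suf):
--             stem = original[:-len(suf)]
--             if stem and candidate == stem:
--                 return True
--
--     if original.endswith("ed") and len(original) >= 4:
--         stem = original[:-2]
--         if len(stem) >= 2 and stem[-1] == stem[-2]:
--             if candidate == stem[:-1]: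
--                 return True
--
--     if original.endswith("ing") and len(original) >= 5:
--         stem = original[:-3]
--         if len(stem) >= 2 and stem[-1] == stem[-2]:
--             if candidate == stem[:-1]:
--                 return True
--
--     return False
-- ===== SOURCE B (Python) =====
-- _SUFFIX_TAILS = {"s", "es", "ed", "d", "ing", "er", "ers", "est", "ly"}
--
--
-- def looks_like_simple_inflection(original: str, candidate: str) -> bool:
--     # candidate must be a prefix; compare the leftover tail once instead of
--     # trying each suffix against original.
--     if not original.startswith(candidate):
--         return False
--     tail = original[len(candidate):]
--     if not tail:
--         return True          # original == candidate
--     if not candidate: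
--         return False         # empty stem never matches
--     if tail in _SUFFIX_TAILS:
--         return True
--     # doubled final consonant: original == candidate + candidate[-1] + "ed"/"ing"
--     doubled = candidate[-1]
--     return tail == doubled + "ed" or tail == doubled + "ing"
-- ===== Notes on version B (the rewrite author's own statement) =====
-- stated objective: simpler
-- what changed: Inverts the decomposition: instead of looping over nine suffixes (endswith + slice per suffix) and re-slicing a stem for the doubled-consonant rules, B checks once that candidate is a prefix, computes the single leftover tail original[len(candidate):], and classifies that tail (empty, in the suffix set, or candidate[-1]+'ed'/'ing').
import Mathlib
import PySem

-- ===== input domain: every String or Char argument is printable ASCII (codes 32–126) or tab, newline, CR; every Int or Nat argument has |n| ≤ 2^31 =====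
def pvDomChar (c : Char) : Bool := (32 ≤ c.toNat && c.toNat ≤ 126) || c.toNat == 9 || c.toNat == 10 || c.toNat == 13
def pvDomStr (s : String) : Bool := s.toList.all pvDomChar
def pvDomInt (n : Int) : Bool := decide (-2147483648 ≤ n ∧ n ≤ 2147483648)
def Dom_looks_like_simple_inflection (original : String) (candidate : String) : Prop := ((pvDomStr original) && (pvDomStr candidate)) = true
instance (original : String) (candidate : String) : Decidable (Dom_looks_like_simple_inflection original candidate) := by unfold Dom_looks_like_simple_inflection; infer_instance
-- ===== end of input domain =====

-- B inverts A's decomposition: rather than trying each of nine suffixes with endswith/slice and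
-- re-slicing a stem for the doubled-consonant rules, it checks once that candidate is a prefix and
-- classifies the single leftover tail (empty / in the suffix set / candidate[-1]+"ed"/"ing") (simpler).

-- ===== PORT A =====
-- suffixes = ["s", "es", "ed", "d", "ing", "er", "ers", "est", "ly"]
def pvSuffixesA : List (List Char) :=
  [['s'], ['e','s'], ['e','d'], ['d'], ['i','n','g'], ['e','r'], ['e','r','s'], ['e','s','t'], ['l','y']]

-- body of A's 'for suf in suffixes' loop (early 'return True' = List.any, first hit wins)
def pvLoopA (o c : List Char) (suf : List Char) : Bool :=
  if PySem.Chars.endswith o suf then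
    let stem := PySem.List.slice o none (some (-(PySem.Chars.len suf : Int)))
    (!(stem == [])) && (c == stem)
  else false

def pvInflectA (o c : List Char) : Bool :=
  if o == c then true
  else if pvSuffixesA.any (pvLoopA o c) then true
  else if PySem.Chars.endswith o ['e','d'] && decide (4 ≤ PySem.Chars.len o) &&
          (let stem := PySem.List.slice o none (some (-2))
           decide (2 ≤ PySem.Chars.len stem) &&
           (PySem.List.pyGet? stem (-1) == PySem.List.pyGet? stem (-2)) &&
           (c == PySem.List.slice stem none (some (-1)))) then true
  else if PySem.Chars.endswith o ['i','n','g'] && decide (5 ≤ PySem.Chars.len o) &&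
          (let stem := PySem.List.slice o none (some (-3))
           decide (2 ≤ PySem.Chars.len stem) &&
           (PySem.List.pyGet? stem (-1) == PySem.List.pyGet? stem (-2)) &&
           (c == PySem.List.slice stem none (some (-1)))) then true
  else false

def looks_like_simple_inflection (original : String) (candidate : String) : Bool :=
  pvInflectA original.toList candidate.toList

-- ===== PORT B =====
-- _SUFFIX_TAILS = {"s", "es", "ed", "d", "ing", "er", "ers", "est", "ly"}
def pvTailSet : PySem.Set (List Char) :=
  PySem.Set.ofList [['s'], ['e','s'], ['e','d'], ['d'], ['i','n','g'], ['e','r'], ['e','r','s'], ['e','s','t'], ['l','y']]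

def pvInflectB (o c : List Char) : Bool :=
  if !(PySem.Chars.startswith o c) then false
  else
    let tail := PySem.List.slice o (some (PySem.Chars.len c : Int)) none
    if tail == [] then true
    else if c == [] then false
    else if PySem.Set.contains pvTailSet tail then true
    else
      -- doubled = candidate[-1]; the 'c == []' branch above guards the index, so none is unreachable
      match PySem.List.pyGet? c (-1) with
      | none => false
      | some doubled => (tail == doubled :: ['e','d']) || (tail == doubled :: ['i','n','g'])

def looks_like_simple_inflection_alt (original : String) (candidate : String) : Bool :=
  pvInflectB original.toList candidate.toList

-- ===== PRECONDITION & SPEC =====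
def Spec_looks_like_simple_inflection (original : String) (candidate : String) (out : Bool) : Prop := out = looks_like_simple_inflection_alt original candidate
instance (original : String) (candidate : String) (out : Bool) : Decidable (Spec_looks_like_simple_inflection original candidate out) := by unfold Spec_looks_like_simple_inflection; infer_instance

-- ===== CLAIM (what is proved, stated in full; the proofs are below) =====
def Claim_equal_looks_like_simple_inflection : Prop := ∀ (original : String) (candidate : String), Dom_looks_like_simple_inflection original candidate → Spec_looks_like_simple_inflection original candidate (looks_like_simple_inflection original candidate)

-- ===== LEMMAS AND PROOFS =====

-- A's loop body fires on suffix `suf` exactly when `o` is a non-empty candidate `c` plus `suf`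
theorem pvLoopA_iff (o c suf : List Char) (hs : suf ≠ []) :
    pvLoopA o c suf = true ↔ (c ≠ [] ∧ o = c ++ suf) := by
  have hk : 0 < suf.length := List.length_pos_iff.mpr hs
  by_cases he : PySem.Chars.endswith o suf = true
  · obtain ⟨p, hp⟩ := (PySem.Chars.endswith_iff o suf).mp he
    have hstem : PySem.List.slice o none (some (-(PySem.Chars.len suf : Int))) = p := by
      simp only [PySem.Chars.len_eq]
      rw [PySem.List.slice_to_neg_natCast o suf.length hk, ← hp]
      have h1 : (p ++ suf).length - suf.length = p.length := by simp
      rw [h1, List.take_left]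
    simp only [pvLoopA, if_pos he, hstem, Bool.and_eq_true, Bool.not_eq_eq_eq_not,
      Bool.not_true, beq_eq_false_iff_ne, beq_iff_eq]
    constructor
    · rintro ⟨hp0, hcp⟩
      exact ⟨hcp ▸ hp0, by rw [← hp, hcp]⟩
    · rintro ⟨hc, ho⟩
      have hcp : c = p := List.append_cancel_right (by rw [← ho, hp])
      exact ⟨hcp ▸ hc, hcp⟩
  · simp only [pvLoopA, if_neg he, Bool.false_eq_true, false_iff, not_and]
    intro _ ho
    exact he ((PySem.Chars.endswith_iff o suf).mpr ⟨c, ho.symm⟩)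

-- membership in B's tail set is membership in A's suffix list
theorem pvTailSet_mem (suf : List Char) :
    PySem.Set.contains pvTailSet suf = true ↔ suf ∈ pvSuffixesA := by
  have h : pvTailSet = pvSuffixesA := by decide
  rw [h]
  exact List.contains_iff_mem

-- A's doubled-consonant 'ed' condition says: o = c ++ [last c, 'e', 'd']
theorem pvEdA_iff (o c : List Char) :
    (PySem.Chars.endswith o ['e','d'] && decide (4 ≤ PySem.Chars.len o) &&
      (let stem := PySem.List.slice o none (some (-2))
       decide (2 ≤ PySem.Chars.len stem) &&
       (PySem.List.pyGet? stem (-1) == PySem.List.pyGet? stem (-2)) &&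
       (c == PySem.List.slice stem none (some (-1))))) = true ↔
    ∃ x, c.getLast? = some x ∧ o = c ++ [x, 'e', 'd'] := by
  constructor
  · intro h
    simp only [Bool.and_eq_true, decide_eq_true_eq, beq_iff_eq, PySem.Chars.len_eq] at h
    obtain ⟨⟨he, h4⟩, ⟨h2, hgg⟩, hc⟩ := h
    obtain ⟨p, hp⟩ := (PySem.Chars.endswith_iff o ['e','d']).mp he
    have hstem : PySem.List.slice o none (some (-2)) = p := by
      rw [PySem.List.slice_to_neg_ofNat o 2 (by omega), ← hp]
      simp
    rw [hstem] at h2 hgg hc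
    have hp2 : 2 ≤ p.length := by exact_mod_cast h2
    have hpne : p ≠ [] := by intro h0; simp [h0] at hp2
    rw [PySem.List.slice_to_neg_one] at hc
    rw [PySem.List.pyGet?_neg_one,
        PySem.List.pyGet?_neg_ofNat p 2 (by omega) (by omega)] at hgg
    refine ⟨p.getLast hpne, ?_, ?_⟩
    · rw [hc, List.getLast?_eq_getElem?, List.length_dropLast, List.getElem?_dropLast,
          if_pos (by omega)]
      have e : p.length - 1 - 1 = p.length - 2 := by omega
      rw [e, ← hgg]
      exact List.getLast?_eq_some_getLast hpne
    · rw [← hp, hc]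
      calc p ++ ['e','d'] = (p.dropLast ++ [p.getLast hpne]) ++ ['e','d'] := by
              rw [List.dropLast_concat_getLast hpne]
        _ = p.dropLast ++ [p.getLast hpne,'e','d'] := by simp
  · rintro ⟨x, hx, ho⟩
    have hcne : c ≠ [] := by intro h0; simp [h0] at hx
    have hcl : 1 ≤ c.length := List.length_pos_iff.mpr hcne
    have hol : o.length = c.length + 3 := by simp [ho]
    have hstem : PySem.List.slice o none (some (-2)) = c ++ [x] := by
      rw [PySem.List.slice_to_neg_ofNat o 2 (by omega), ho]
      have h0 : (c ++ [x, 'e', 'd']) = (c ++ [x]) ++ ['e','d'] := by simp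
      rw [h0]
      have h1 : ((c ++ [x]) ++ ['e','d']).length - 2 = (c ++ [x]).length := by simp
      rw [h1, List.take_left]
    simp only [Bool.and_eq_true, decide_eq_true_eq, beq_iff_eq, PySem.Chars.len_eq, hstem]
    refine ⟨⟨?_, by omega⟩, ⟨by simp; omega, ?_⟩, ?_⟩
    · exact (PySem.Chars.endswith_iff o ['e','d']).mpr ⟨c ++ [x], by simp [ho]⟩
    · rw [PySem.List.pyGet?_neg_one, List.getLast?_concat,
          PySem.List.pyGet?_neg_ofNat _ 2 (by omega) (by simp; omega)]
      have h1 : (c ++ [x]).length - 2 = c.length - 1 := by simp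
      rw [h1, List.getElem?_append_left (by omega), ← List.getLast?_eq_getElem?, hx]
    · rw [PySem.List.slice_to_neg_one, List.dropLast_concat]

-- A's doubled-consonant 'ing' condition says: o = c ++ [last c, 'i', 'n', 'g']
theorem pvIngA_iff (o c : List Char) :
    (PySem.Chars.endswith o ['i','n','g'] && decide (5 ≤ PySem.Chars.len o) &&
      (let stem := PySem.List.slice o none (some (-3))
       decide (2 ≤ PySem.Chars.len stem) &&
       (PySem.List.pyGet? stem (-1) == PySem.List.pyGet? stem (-2)) &&
       (c == PySem.List.slice stem none (some (-1))))) = true ↔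
    ∃ x, c.getLast? = some x ∧ o = c ++ [x, 'i', 'n', 'g'] := by
  constructor
  · intro h
    simp only [Bool.and_eq_true, decide_eq_true_eq, beq_iff_eq, PySem.Chars.len_eq] at h
    obtain ⟨⟨he, h5⟩, ⟨h2, hgg⟩, hc⟩ := h
    obtain ⟨p, hp⟩ := (PySem.Chars.endswith_iff o ['i','n','g']).mp he
    have hstem : PySem.List.slice o none (some (-3)) = p := by
      rw [PySem.List.slice_to_neg_ofNat o 3 (by omega), ← hp]
      simp
    rw [hstem] at h2 hgg hc
    have hp2 : 2 ≤ p.length := by exact_mod_cast h2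
    have hpne : p ≠ [] := by intro h0; simp [h0] at hp2
    rw [PySem.List.slice_to_neg_one] at hc
    rw [PySem.List.pyGet?_neg_one,
        PySem.List.pyGet?_neg_ofNat p 2 (by omega) (by omega)] at hgg
    refine ⟨p.getLast hpne, ?_, ?_⟩
    · rw [hc, List.getLast?_eq_getElem?, List.length_dropLast, List.getElem?_dropLast,
          if_pos (by omega)]
      have e : p.length - 1 - 1 = p.length - 2 := by omega
      rw [e, ← hgg]
      exact List.getLast?_eq_some_getLast hpne
    · rw [← hp, hc]
      calc p ++ ['i','n','g'] = (p.dropLast ++ [p.getLast hpne]) ++ ['i','n','g'] := by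
              rw [List.dropLast_concat_getLast hpne]
        _ = p.dropLast ++ [p.getLast hpne,'i','n','g'] := by simp
  · rintro ⟨x, hx, ho⟩
    have hcne : c ≠ [] := by intro h0; simp [h0] at hx
    have hcl : 1 ≤ c.length := List.length_pos_iff.mpr hcne
    have hol : o.length = c.length + 4 := by simp [ho]
    have hstem : PySem.List.slice o none (some (-3)) = c ++ [x] := by
      rw [PySem.List.slice_to_neg_ofNat o 3 (by omega), ho]
      have h0 : (c ++ [x, 'i', 'n', 'g']) = (c ++ [x]) ++ ['i','n','g'] := by simp
      rw [h0]
      have h1 : ((c ++ [x]) ++ ['i','n','g']).length - 3 = (c ++ [x]).length := by simp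
      rw [h1, List.take_left]
    simp only [Bool.and_eq_true, decide_eq_true_eq, beq_iff_eq, PySem.Chars.len_eq, hstem]
    refine ⟨⟨?_, by omega⟩, ⟨by simp; omega, ?_⟩, ?_⟩
    · exact (PySem.Chars.endswith_iff o ['i','n','g']).mpr ⟨c ++ [x], by simp [ho]⟩
    · rw [PySem.List.pyGet?_neg_one, List.getLast?_concat,
          PySem.List.pyGet?_neg_ofNat _ 2 (by omega) (by simp; omega)]
      have h1 : (c ++ [x]).length - 2 = c.length - 1 := by simp
      rw [h1, List.getElem?_append_left (by omega), ← List.getLast?_eq_getElem?, hx]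
    · rw [PySem.List.slice_to_neg_one, List.dropLast_concat]

-- an if-chain of early 'return True's is a disjunction
theorem pvIfChain (a b c d : Bool) :
    (if a then true else if b then true else if c then true else if d then true else false) =
      (a || b || c || d) := by
  cases a <;> cases b <;> cases c <;> cases d <;> rfl

-- A as a four-way disjunction of its return-True conditions
theorem pvInflectA_iff (o c : List Char) :
    pvInflectA o c = true ↔
      o = c ∨ pvSuffixesA.any (pvLoopA o c) = true ∨
      (∃ x, c.getLast? = some x ∧ o = c ++ [x, 'e', 'd']) ∨
      (∃ x, c.getLast? = some x ∧ o = c ++ [x, 'i', 'n', 'g']) := by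
  unfold pvInflectA
  rw [pvIfChain]
  simp only [Bool.or_eq_true, beq_iff_eq, pvEdA_iff, pvIngA_iff]
  rw [or_assoc, or_assoc]

-- the two ports agree on the underlying character lists
theorem pvInflect_eq (o c : List Char) : pvInflectA o c = pvInflectB o c := by
  rw [Bool.eq_iff_iff, pvInflectA_iff]
  by_cases hpre : PySem.Chars.startswith o c = true
  case neg =>
    have hnp : ∀ s : List Char, o ≠ c ++ s := by
      intro s hs
      exact hpre ((PySem.Chars.startswith_iff o c).mpr ⟨s, hs.symm⟩)
    have hB : pvInflectB o c = false := by
      unfold pvInflectB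
      rw [if_pos (by simp [hpre])]
    rw [hB]
    simp only [Bool.false_eq_true, iff_false]
    rintro (h | h | ⟨x, _, hx⟩ | ⟨x, _, hx⟩)
    · exact hnp [] (by simp [h])
    · obtain ⟨suf, hsuf, hfire⟩ := List.any_eq_true.mp h
      have hall : ∀ s ∈ pvSuffixesA, s ≠ [] := by decide
      have hs : suf ≠ [] := hall suf hsuf
      exact hnp suf ((pvLoopA_iff o c suf hs).mp hfire).2
    · exact hnp _ hx
    · exact hnp _ hx
  case pos =>
    obtain ⟨t, ht⟩ := (PySem.Chars.startswith_iff o c).mp hpre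
    have htail : PySem.List.slice o (some (PySem.Chars.len c : Int)) none = t := by
      simp only [PySem.Chars.len_eq]
      rw [PySem.List.slice_from_natCast, ← ht, List.drop_left]
    by_cases ht0 : t = []
    · subst ht0
      have hoc : o = c := by simp [← ht]
      have hB : pvInflectB o c = true := by
        unfold pvInflectB
        rw [if_neg (by rw [hpre]; simp), htail]
        rfl
      rw [hB]
      simp [hoc]
    · by_cases hc0 : c = []
      · subst hc0
        have hB : pvInflectB o [] = false := by
          unfold pvInflectB
          rw [if_neg (by rw [hpre]; simp), htail, if_neg (by simp [ht0])]
          rfl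
        rw [hB]
        simp only [Bool.false_eq_true, iff_false]
        rintro (h | h | ⟨x, hx, _⟩ | ⟨x, hx, _⟩)
        · have hto : t = o := by simpa using ht
          exact ht0 (hto.trans h)
        · obtain ⟨suf, hsuf, hfire⟩ := List.any_eq_true.mp h
          have hall : ∀ s ∈ pvSuffixesA, s ≠ [] := by decide
          exact absurd rfl ((pvLoopA_iff o [] suf (hall suf hsuf)).mp hfire).1
        · simp at hx
        · simp at hx
      · obtain ⟨x, hx⟩ : ∃ x, c.getLast? = some x :=
          ⟨c.getLast hc0, List.getLast?_eq_some_getLast hc0⟩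
        have hget : PySem.List.pyGet? c (-1) = some x := by
          rw [PySem.List.pyGet?_neg_one, hx]
        have hB : pvInflectB o c =
            (PySem.Set.contains pvTailSet t ||
              ((t == x :: ['e','d']) || (t == x :: ['i','n','g']))) := by
          unfold pvInflectB
          rw [if_neg (by rw [hpre]; simp), htail, if_neg (by simp [ht0]),
              if_neg (by simp [hc0]), hget]
          cases h : PySem.Set.contains pvTailSet t <;> simp
        rw [hB]
        simp only [Bool.or_eq_true, beq_iff_eq, pvTailSet_mem]
        constructor
        · rintro (h | h | ⟨y, hy, hyo⟩ | ⟨y, hy, hyo⟩)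
          · exact absurd (List.append_cancel_left (by rw [ht, h, List.append_nil])) ht0
          · obtain ⟨suf, hsuf, hfire⟩ := List.any_eq_true.mp h
            have hall : ∀ s ∈ pvSuffixesA, s ≠ [] := by decide
            have hts : t = suf :=
              List.append_cancel_left (by rw [ht, ((pvLoopA_iff o c suf (hall suf hsuf)).mp hfire).2])
            exact Or.inl (hts ▸ hsuf)
          · have hxy : y = x := by rw [hx] at hy; exact (Option.some_inj.mp hy).symm
            exact Or.inr (Or.inl (List.append_cancel_left (by rw [ht, hyo, hxy])))
          · have hxy : y = x := by rw [hx] at hy; exact (Option.some_inj.mp hy).symm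
            exact Or.inr (Or.inr (List.append_cancel_left (by rw [ht, hyo, hxy])))
        · rintro (h | h | h)
          · refine Or.inr (Or.inl (List.any_eq_true.mpr ⟨t, h, ?_⟩))
            have hall : ∀ s ∈ pvSuffixesA, s ≠ [] := by decide
            exact (pvLoopA_iff o c t (hall t h)).mpr ⟨hc0, ht.symm⟩
          · exact Or.inr (Or.inr (Or.inl ⟨x, hx, by rw [← ht, h]⟩))
          · exact Or.inr (Or.inr (Or.inr ⟨x, hx, by rw [← ht, h]⟩))


-- ===== VERDICT (by name: the statement is the Claim_ definition above) =====
theorem looks_like_simple_inflection_spec : Claim_equal_looks_like_simple_inflection := by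
  intro original candidate _
  unfold Spec_looks_like_simple_inflection looks_like_simple_inflection looks_like_simple_inflection_alt
  exact pvInflect_eq original.toList candidate.toList
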